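-- pv_equiv track=rewrite | github.com/blueszeng/llgame1.0 | scripts/common/Rules_ZJH.py | getCardsLevel
-- ===== SOURCE A (Python) =====
-- def getCardsLevel(cards,num):
--     levs = {}
--     for i in range(0,len(cards)):
--         lev = int((cards[i]-1)/4)
--         if lev in levs:
--             levs[lev] += 1
--         else:
--             levs[lev] = 1
--
--     for key,value in levs.items():
--         if value == num:
--             return key
--     return 0
-- ===== SOURCE B (Python) =====
-- def getCardsLevel(cards, num):
--     levs = [int((c - 1) / 4) for c in cards]
--     while levs:
--         lev = levs[0]
--         if len([l for l in levs if l == lev]) == num: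
--             return lev
--         levs = [l for l in levs if l != lev]
--     return 0
-- ===== Notes on version B (the rewrite author's own statement) =====
-- stated objective: alternative
-- what changed: Replaces A's two-phase frequency-dict algorithm (build counts, then scan items) with a partition-and-discard loop: repeatedly take the first remaining level, count its group by filtering, return it if the group size matches, otherwise drop the whole group and continue on the shrunken list.
import Mathlib
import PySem

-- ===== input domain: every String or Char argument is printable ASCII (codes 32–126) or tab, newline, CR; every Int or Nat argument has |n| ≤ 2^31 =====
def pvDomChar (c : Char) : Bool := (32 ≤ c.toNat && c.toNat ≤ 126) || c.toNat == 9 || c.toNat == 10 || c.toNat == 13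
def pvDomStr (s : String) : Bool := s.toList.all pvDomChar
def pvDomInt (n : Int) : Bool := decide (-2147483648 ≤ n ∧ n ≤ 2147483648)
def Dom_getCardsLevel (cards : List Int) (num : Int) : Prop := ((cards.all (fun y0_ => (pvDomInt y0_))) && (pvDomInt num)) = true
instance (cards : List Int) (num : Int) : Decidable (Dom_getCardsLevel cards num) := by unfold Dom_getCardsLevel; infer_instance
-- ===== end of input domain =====

-- B replaces A's frequency dict (build counts, then scan items) by a
-- partition-and-discard loop over the level list (alternative; not faster).

-- ===== PORT A =====
-- second loop of A: first key whose value equals num, else 0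
def getCardsLevelLoop (its : List (Int × Int)) (num : Int) : Int :=
  match its with
  | [] => 0
  | (k, v) :: rest => if v == num then k else getCardsLevelLoop rest num

def getCardsLevel (cards : List Int) (num : Int) : Int :=
  -- int((cards[i]-1)/4) is exact truncating division for |cards[i]| ≤ 2^31: PySem.Int.truncdiv
  let levs := (PySem.List.pyRange 0 (PySem.List.len cards) 1).foldl
      (fun d i =>
        let lev := PySem.Int.truncdiv (PySem.List.pyGetD cards i 0 - 1) 4
        if d.contains lev then d.modify lev 0 (· + 1) else d.insert lev 1)
      PySem.Dict.empty
  getCardsLevelLoop levs.items num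

-- ===== PORT B =====
-- B's while-loop: take the first remaining level, return it if its group size is num,
-- else drop the whole group and continue
def getCardsLevelAltLoop (num : Int) (levs : List Int) : Int :=
  match levs with
  | [] => 0
  | lev :: t =>
      if ((PySem.List.len ((lev :: t).filter (fun l => l == lev)) : Int) == num) then lev
      else getCardsLevelAltLoop num ((lev :: t).filter (fun l => !(l == lev)))
  termination_by levs.length
  decreasing_by
    simp only [List.filter]
    simp
    exact List.length_filter_le _ _

def getCardsLevel_alt (cards : List Int) (num : Int) : Int :=
  let levs := cards.map (fun c => PySem.Int.truncdiv (c - 1) 4)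
  getCardsLevelAltLoop num levs

-- ===== PRECONDITION & SPEC =====
def Spec_getCardsLevel (cards : List Int) (num : Int) (out : Int) : Prop := out = getCardsLevel_alt cards num
instance (cards : List Int) (num : Int) (out : Int) : Decidable (Spec_getCardsLevel cards num out) := by unfold Spec_getCardsLevel; infer_instance

-- ===== CLAIM (what is proved, stated in full; the proofs are below) =====
def Claim_equal_getCardsLevel : Prop := ∀ (cards : List Int) (num : Int), Dom_getCardsLevel cards num → Spec_getCardsLevel cards num (getCardsLevel cards num)

-- ===== LEMMAS AND PROOFS =====

-- the dict-building step of A, as a function of the card value (proof helper)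
def pvStepA (d : PySem.Dict Int Int) (c : Int) : PySem.Dict Int Int :=
  let lev := PySem.Int.truncdiv (c - 1) 4
  if d.contains lev then d.modify lev 0 (· + 1) else d.insert lev 1

-- A's second loop over Counter items is a find? over the distinct levels
theorem loopA_eq_find (ys : List Int) (g : Int → Int) (num : Int) :
    getCardsLevelLoop (ys.map (fun k => (k, g k))) num
      = ((ys.find? (fun k => g k == num)).getD 0) := by
  induction ys with
  | nil => rfl
  | cons y ys ih =>
      simp only [List.map_cons, getCardsLevelLoop, List.find?]
      by_cases h : g y == num <;> simp [h, ih]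

-- find? over predicates agreeing on members
theorem find?_congr_mem (p q : Int → Bool) (xs : List Int)
    (h : ∀ x ∈ xs, p x = q x) : xs.find? p = xs.find? q := by
  induction xs with
  | nil => rfl
  | cons x xs ih =>
      simp only [List.find?]
      rw [h x (by simp), ih (fun y hy => h y (by simp [hy]))]

-- removing all copies of an element failing the predicate does not change find?
theorem find?_filter_ne (p : Int → Bool) (a : Int) (xs : List Int) (ha : p a = false) :
    List.find? p (xs.filter (fun l => !(l == a))) = List.find? p xs := by
  induction xs with
  | nil => rfl
  | cons x xs ih =>
      by_cases hx : x = a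
      · subst hx; simp [List.filter, List.find?, ha, ih]
      · simp only [List.filter, List.find?]
        have : (!(x == a)) = true := by simp [hx]
        rw [this]
        by_cases hp : p x <;> simp [List.find?, hp, ih]

-- unfolding equation for B's loop on a nonempty list
theorem altLoop_cons (num lev : Int) (t : List Int) :
    getCardsLevelAltLoop num (lev :: t)
      = (if ((PySem.List.len ((lev :: t).filter (fun l => l == lev)) : Int) == num) then lev
         else getCardsLevelAltLoop num ((lev :: t).filter (fun l => !(l == lev)))) := by
  rw [getCardsLevelAltLoop.eq_def]

-- B's loop computes the first element whose count (in its argument) equals num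
theorem altLoop_eq_find (num : Int) (levs : List Int) :
    getCardsLevelAltLoop num levs
      = ((levs.find? (fun l => ((List.count l levs : Int) == num))).getD 0) := by
  induction hn : levs.length using Nat.strong_induction_on generalizing levs with
  | _ n ih =>
    cases levs with
    | nil =>
        rw [getCardsLevelAltLoop.eq_def]
        rfl
    | cons lev t =>
        rw [altLoop_cons]
        have hcount : (PySem.List.len ((lev :: t).filter (fun l => l == lev)) : Int)
            = (List.count lev (lev :: t) : Int) := by
          simp [PySem.List.len, List.count, List.countP_eq_length_filter]
        rw [hcount]
        by_cases hb : ((List.count lev (lev :: t) : Int) == num) = true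
        · rw [if_pos hb, List.find?_cons_of_pos (p := fun l => ((List.count l (lev :: t) : Int) == num)) hb]
          rfl
        · have hb' : ((List.count lev (lev :: t) : Int) == num) = false := by
            simpa using hb
          rw [if_neg hb, List.find?_cons_of_neg (p := fun l => ((List.count l (lev :: t) : Int) == num)) hb]
          set rest := (lev :: t).filter (fun l => !(l == lev)) with hrest
          have hlen : rest.length < n := by
            subst hn
            rw [hrest]
            simp only [List.filter]
            simp
            exact List.length_filter_le _ _
          rw [ih rest.length hlen rest rfl]
          -- counts in rest agree with counts in lev :: t for members of rest
          have hcongr : rest.find? (fun l => ((List.count l rest : Int) == num))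
              = rest.find? (fun l => ((List.count l (lev :: t) : Int) == num)) := by
            apply find?_congr_mem
            intro x hx
            have hxne : ¬ (x = lev) := by
              intro h
              subst h
              have := List.of_mem_filter hx
              simp at this
            have : List.count x rest = List.count x (lev :: t) := by
              rw [hrest, List.count_filter]
              simp [hxne]
            rw [this]
          rw [hcongr, hrest,
            find?_filter_ne (fun l => ((List.count l (lev :: t) : Int) == num)) lev (lev :: t) hb',
            List.find?_cons_of_neg (p := fun l => ((List.count l (lev :: t) : Int) == num)) hb]

-- find? ignores first-occurrence deduplication (the predicate depends on the value only)
theorem find?_ofList (p : Int → Bool) (xs : List Int) :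
    List.find? p (PySem.Set.ofList xs) = List.find? p xs := by
  induction xs with
  | nil => rfl
  | cons x xs ih =>
      rw [PySem.Set.ofList_cons]
      by_cases h : p x
      · simp [List.find?, h]
      · simp only [List.find?, h]
        rw [← ih]
        have hd : PySem.Set.discard (PySem.Set.ofList xs) x
            = (PySem.Set.ofList xs).filter (fun y => !(y == x)) := rfl
        rw [hd, List.find?_filter]
        have hpq : (fun a => decide ((!(a == x)) = true ∧ p a = true)) = p := by
          funext y
          by_cases hy : y = x
          · subst hy; simp [h]
          · simp [hy]
        rw [hpq]

theorem getCardsLevel_spec' (cards : List Int) (num : Int) :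
    getCardsLevel cards num = getCardsLevel_alt cards num := by
  show getCardsLevelLoop
      (((PySem.List.pyRange 0 (PySem.List.len cards) 1).foldl
        (fun d i =>
          let lev := PySem.Int.truncdiv (PySem.List.pyGetD cards i 0 - 1) 4
          if d.contains lev then d.modify lev 0 (· + 1) else d.insert lev 1)
        PySem.Dict.empty).items) num
    = getCardsLevelAltLoop num (cards.map (fun c => PySem.Int.truncdiv (c - 1) 4))
  have hfold :
      (PySem.List.pyRange 0 (PySem.List.len cards) 1).foldl
        (fun d i =>
          let lev := PySem.Int.truncdiv (PySem.List.pyGetD cards i 0 - 1) 4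
          if d.contains lev then d.modify lev 0 (· + 1) else d.insert lev 1)
        PySem.Dict.empty
      = PySem.Dict.counter (cards.map (fun c => PySem.Int.truncdiv (c - 1) 4)) := by
    have h1 : (fun (d : PySem.Dict Int Int) (i : Int) =>
        let lev := PySem.Int.truncdiv (PySem.List.pyGetD cards i 0 - 1) 4
        if d.contains lev then d.modify lev 0 (· + 1) else d.insert lev 1)
        = (fun d i => pvStepA d (PySem.List.pyGetD cards i 0)) := rfl
    rw [h1, PySem.List.foldl_pyRange_pyGetD cards 0 pvStepA PySem.Dict.empty (by norm_num)]
    simp only [Int.toNat_zero, List.drop_zero]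
    rw [PySem.Dict.counter_eq_foldl, List.foldl_map]
    apply PySem.List.foldl_congr_mem
    intro d c _
    unfold pvStepA
    by_cases h : d.contains (PySem.Int.truncdiv (c - 1) 4)
    · simp [h]
    · have h' : d.contains (PySem.Int.truncdiv (c - 1) 4) = false := by simpa using h
      simp [h', PySem.Dict.modify, PySem.Dict.getD_of_not_contains]
  rw [hfold, PySem.Dict.items_counter, loopA_eq_find, altLoop_eq_find, find?_ofList]

-- ===== VERDICT (by name: the statement is the Claim_ definition above) =====
theorem getCardsLevel_spec : Claim_equal_getCardsLevel := by
  intro cards num _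
  unfold Spec_getCardsLevel
  exact getCardsLevel_spec' cards num
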